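-- pv_equiv track=rewrite | github.com/TheAntTeam/gerbyx | src/gerbyx/tokenizer.py | tokenize_gerber
-- ===== SOURCE A (Python) =====
-- from typing import Generator, Tuple
--
-- def tokenize_gerber(text: str) -> Generator[Tuple[str, str], None, None]:
--     """
--     Tokenizza un file Gerber in modo robusto.
--
--     Itera attraverso il testo cercando i delimitatori di comando ('*' e '%').
--
--     Restituisce un generatore di tuple (tipo, valore) dove:
--     - 'param': Un comando all'interno di un blocco di parametri estesi (es. 'FSLAX24Y24*').
--     - 'stmt': Un comando standard del corpo del file (es. 'G01*', 'X100Y100D02*').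
--     - 'comment': Un commento G04 (es. 'G04 Questo è un commento*').
--     """
--     pos = 0
--     text_len = len(text)
--
--     while pos < text_len:
--         # Salta whitespace
--         while pos < text_len and text[pos].isspace():
--             pos += 1
--
--         if pos >= text_len:
--             break
--
--         # Controlla se siamo all'inizio di un blocco di parametri
--         if text[pos] == '%':
--             # Trovato un blocco di parametri. Cerca la fine del blocco.
--             end_percent_pos = text.find('%', pos + 1)
--             if end_percent_pos == -1:
--                 # Blocco non chiuso, errore. Per robustezza, lo trattiamo come un blocco fino alla fine.
--                 end_percent_pos = text_len
--
--             # Il contenuto del blocco è tra i due '%'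
--             param_content = text[pos + 1 : end_percent_pos]
--
--             # All'interno del blocco, i comandi sono separati da '*'
--             # Li emettiamo come token 'param'
--             # Attenzione: le macro (AM) possono avere più comandi interni.
--             # Lo standard dice che i comandi estesi terminano con *.
--             # Quindi splittiamo per * e ignoriamo le parti vuote.
--
--             # Nota: split('*') rimuove i delimitatori, ma noi vogliamo mantenerli per coerenza
--             # con il resto del parser che si aspetta comandi terminati da *.
--
--             # Esempio: "FSLAX24Y24*MOMM*" -> ["FSLAX24Y24", "MOMM", ""]
--             parts = param_content.split('*')
--             for part in parts:
--                 cmd = part.strip()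
--                 if cmd:
--                     # Aggiungiamo l'asterisco che è stato rimosso dallo split
--                     yield ('param', cmd + '*')
--
--             # Avanza il puntatore principale alla fine del blocco %...%
--             pos = end_percent_pos + 1
--
--         else:
--             # Non è un blocco di parametri, quindi è uno statement normale che finisce con '*'
--             star_pos = text.find('*', pos)
--             if star_pos == -1:
--                 # Statement non terminato, prendiamo il resto del file
--                 stmt = text[pos:].strip()
--                 if stmt:
--                     # Potrebbe essere un G04
--                     if stmt.startswith('G04'):
--                         yield ('comment', stmt)
--                     else:
--                         yield ('stmt', stmt)
--                 break # Finito
--             else: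
--                 stmt = text[pos : star_pos + 1].strip()
--
--                 # Rimuoviamo newline interni che possono spezzare comandi lunghi
--                 stmt = stmt.replace('\n', '').replace('\r', '')
--
--                 if stmt:
--                     if stmt.startswith('G04'):
--                         yield ('comment', stmt)
--                     else:
--                         yield ('stmt', stmt)
--
--                 # Avanza il puntatore principale alla fine dello statement
--                 pos = star_pos + 1
-- ===== SOURCE B (Python) =====
-- def tokenize_gerber(text):
--     """Single forward character-scanning state machine: one pass, a boolean
--     in_param and a buffer, instead of A's find-and-slice position jumps."""
--     in_param = False
--     buf = []
--     for ch in text: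
--         if in_param:
--             if ch == '%' or ch == '*':
--                 part = ''.join(buf).strip()
--                 buf = []
--                 if part:
--                     yield ('param', part + '*')
--                 if ch == '%':
--                     in_param = False
--             else:
--                 buf.append(ch)
--         else:
--             if ch == '*':
--                 stmt = (''.join(buf) + '*').strip().replace('\n', '').replace('\r', '')
--                 buf = []
--                 yield ('comment' if stmt.startswith('G04') else 'stmt', stmt)
--             elif ch == '%' and not ''.join(buf).strip():
--                 buf = []
--                 in_param = True
--             else:
--                 buf.append(ch)
--     tail = ''.join(buf).strip()
--     if tail:
--         if in_param:
--             yield ('param', tail + '*')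
--         else:
--             yield ('comment' if tail.startswith('G04') else 'stmt', tail)
-- ===== Notes on version B (the rewrite author's own statement) =====
-- stated objective: alternative
-- what changed: A tokenizes by find-and-slice position jumps (str.find for the closing '%'/'*', slicing and splitting each block); B is a single forward character-scanning state machine that keeps an in_param flag and a token buffer and emits tokens as delimiters arrive.
import Mathlib
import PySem

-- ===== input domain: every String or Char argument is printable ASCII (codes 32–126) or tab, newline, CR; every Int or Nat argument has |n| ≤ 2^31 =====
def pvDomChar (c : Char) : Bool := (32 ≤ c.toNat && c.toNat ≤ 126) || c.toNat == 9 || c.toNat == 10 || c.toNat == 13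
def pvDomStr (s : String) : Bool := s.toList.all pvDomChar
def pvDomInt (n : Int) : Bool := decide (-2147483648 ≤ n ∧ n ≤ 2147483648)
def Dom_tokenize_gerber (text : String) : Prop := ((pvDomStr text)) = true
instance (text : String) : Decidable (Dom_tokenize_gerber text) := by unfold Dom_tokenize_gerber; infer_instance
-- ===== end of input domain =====

-- B rewrites A's find-and-slice position jumps as a single forward character-scanning
-- state machine (objective: alternative decomposition, same O(n) cost).

-- ===== PORT A =====
-- inner `while pos < text_len and text[pos].isspace(): pos += 1` loop
def pvSkipWs (cs : List Char) (pos : Nat) : Nat :=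
  if h : pos < cs.length then
    if PySem.Chars.strIsspace [cs[pos]] then pvSkipWs cs (pos + 1) else pos
  else pos
termination_by cs.length - pos

theorem pvSkipWs_ge (cs : List Char) (pos : Nat) : pos ≤ pvSkipWs cs pos := by
  unfold pvSkipWs
  split
  · split
    · have := pvSkipWs_ge cs (pos + 1); omega
    · exact le_refl _
  · exact le_refl _
termination_by cs.length - pos

-- the main `while pos < text_len` loop of A
def pvTokA (cs : List Char) (pos : Nat) : List (String × String) :=
  if h : pos < cs.length then
    let p := pvSkipWs cs pos
    if h2 : p < cs.length then
      if cs[p] = '%' then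
        let e := PySem.Chars.findFrom cs ['%'] ((p + 1 : Nat) : Int) none
        let e' : Nat := if e = -1 then cs.length else e.toNat
        let content := PySem.List.slice cs (some ((p + 1 : Nat) : Int)) (some ((e' : Nat) : Int))
        ((PySem.Chars.splitOn content ['*']).foldl
          (fun acc part =>
            let cmd := PySem.Chars.strip part
            if cmd.isEmpty then acc else acc ++ [("param", String.ofList (cmd ++ ['*']))]) [])
        ++ pvTokA cs (e' + 1)
      else
        let star := PySem.Chars.findFrom cs ['*'] ((p : Nat) : Int) none
        if star = -1 then
          let stmt := PySem.Chars.strip (PySem.List.slice cs (some ((p : Nat) : Int)) none)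
          if stmt.isEmpty then [] else
            [(if PySem.Chars.startswith stmt ['G', '0', '4'] then "comment" else "stmt", String.ofList stmt)]
        else
          let stmt := PySem.Chars.replace (PySem.Chars.replace
              (PySem.Chars.strip (PySem.List.slice cs (some ((p : Nat) : Int)) (some (star + 1))))
              ['\n'] []) ['\r'] []
          (if stmt.isEmpty then [] else
            [(if PySem.Chars.startswith stmt ['G', '0', '4'] then "comment" else "stmt", String.ofList stmt)])
          ++ pvTokA cs (star.toNat + 1)
    else []
  else []
termination_by cs.length - pos
decreasing_by
  · -- param block: recurse at e' + 1
    have hp := pvSkipWs_ge cs pos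
    by_cases hm : PySem.Chars.findFrom cs ['%'] ((pvSkipWs cs pos + 1 : Nat) : Int) none = -1
    · rw [dif_pos hm]; omega
    · rw [dif_neg hm]
      have hspec := (PySem.Chars.findFrom_natCast_spec cs ['%'] (pvSkipWs cs pos + 1) (by omega) hm).1
      omega
  · -- statement: recurse at star.toNat + 1
    have hp := pvSkipWs_ge cs pos
    rename_i hstar
    have hspec := (PySem.Chars.findFrom_natCast_spec cs ['*'] (pvSkipWs cs pos) (by omega) hstar).1
    omega

def tokenize_gerber (text : String) : List (String × String) := pvTokA text.toList 0

-- ===== PORT B =====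
-- single forward scan: state = (in_param, buffer); one step per character
def pvScanB (inParam : Bool) (buf : List Char) : List Char → List (String × String)
  | [] =>
    let tail := PySem.Chars.strip buf
    if tail.isEmpty then []
    else if inParam then [("param", String.ofList (tail ++ ['*']))]
    else [(if PySem.Chars.startswith tail ['G', '0', '4'] then "comment" else "stmt", String.ofList tail)]
  | c :: rest =>
    if inParam then
      if c = '%' ∨ c = '*' then
        let part := PySem.Chars.strip buf
        (if part.isEmpty then [] else [("param", String.ofList (part ++ ['*']))])
          ++ pvScanB (if c = '%' then false else true) [] rest
      else pvScanB true (buf ++ [c]) rest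
    else
      if c = '*' then
        let stmt := PySem.Chars.replace (PySem.Chars.replace
            (PySem.Chars.strip (buf ++ ['*'])) ['\n'] []) ['\r'] []
        [(if PySem.Chars.startswith stmt ['G', '0', '4'] then "comment" else "stmt", String.ofList stmt)]
          ++ pvScanB false [] rest
      else if c = '%' ∧ (PySem.Chars.strip buf).isEmpty then
        pvScanB true [] rest
      else pvScanB false (buf ++ [c]) rest

def tokenize_gerber_alt (text : String) : List (String × String) := pvScanB false [] text.toList

-- ===== PRECONDITION & SPEC =====
def Spec_tokenize_gerber (text : String) (out : List (String × String)) : Prop := out = tokenize_gerber_alt text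
instance (text : String) (out : List (String × String)) : Decidable (Spec_tokenize_gerber text out) := by unfold Spec_tokenize_gerber; infer_instance

-- ===== CLAIM (what is proved, stated in full; the proofs are below) =====
def Claim_equal_tokenize_gerber : Prop := ∀ (text : String), Dom_tokenize_gerber text → Spec_tokenize_gerber text (tokenize_gerber text)

-- ===== LEMMAS AND PROOFS =====

-- ---- reference tokenizer on the whitespace-stripped suffix ----

-- Python split('*') for a single-character separator, structurally
def pvSplitChar (c : Char) : List Char → List (List Char)
  | [] => [[]]
  | h :: t => if h = c then [] :: pvSplitChar c t else (pvSplitChar c t).modifyHead (h :: ·)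

def pvEmit (part : List Char) : List (String × String) :=
  if (PySem.Chars.strip part).isEmpty then []
  else [("param", String.ofList (PySem.Chars.strip part ++ ['*']))]

def pvPTokens (content : List Char) : List (String × String) :=
  (pvSplitChar '*' content).flatMap pvEmit

def pvStmtTok (s : List Char) : List (String × String) :=
  [(if PySem.Chars.startswith s ['G', '0', '4'] then "comment" else "stmt", String.ofList s)]

def pvClean (z : List Char) : List Char :=
  PySem.Chars.replace (PySem.Chars.replace (PySem.Chars.strip z) ['\n'] []) ['\r'] []

def pvTokCore (l1 : List Char) : List (String × String) :=
  match l1 with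
  | [] => []
  | c :: t =>
    if c = '%' then
      pvPTokens (t.takeWhile (· != '%')) ++
        (if '%' ∈ t then pvTokCore (((t.dropWhile (· != '%')).tail).dropWhile PySem.Chars.isspace) else [])
    else
      if '*' ∈ (c :: t) then
        pvStmtTok (pvClean ((c :: t).takeWhile (· != '*') ++ ['*'])) ++
          pvTokCore ((((c :: t).dropWhile (· != '*')).tail).dropWhile PySem.Chars.isspace)
      else
        pvStmtTok (PySem.Chars.strip (c :: t))
termination_by l1.length
decreasing_by
  · have h1 := List.length_dropWhile_le (· != '%') t
    have h2 := List.length_dropWhile_le PySem.Chars.isspace ((t.dropWhile (· != '%')).tail)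
    simp only [List.length_tail, List.length_cons] at *
    omega
  · have h1 := List.length_dropWhile_le (· != '*') (c :: t)
    have h2 := List.length_dropWhile_le PySem.Chars.isspace (((c :: t).dropWhile (· != '*')).tail)
    simp only [List.length_tail, List.length_cons] at *
    omega

-- ---- characterizations of the PySem primitives used by port A ----

theorem pvFindGo_singleton (c : Char) (l : List Char) (k : Nat) :
    PySem.Chars.find.go [c] l k =
      if c ∈ l then ((k + (l.takeWhile (· != c)).length : Nat) : Int) else -1 := by
  induction l generalizing k with
  | nil => simp [PySem.Chars.find.go]
  | cons h t ih =>
    rw [PySem.Chars.find.go]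
    by_cases hc : h = c
    · subst hc
      simp [List.isPrefixOf]
    · have hpre : [c].isPrefixOf (h :: t) = false := by
        simp [List.isPrefixOf]; exact fun e => absurd e.symm hc
      rw [hpre]
      simp only [Bool.false_eq_true, if_false, ih (k + 1), List.mem_cons, List.takeWhile_cons]
      have hb : (h != c) = true := by simp [hc]
      rw [hb]
      by_cases hm : c ∈ t
      · simp only [hm, or_true, if_true, List.length_cons]
        push_cast; ring
      · simp [hm, Ne.symm hc]

theorem pvFind_singleton (c : Char) (l : List Char) :
    PySem.Chars.find l [c] =
      if c ∈ l then (((l.takeWhile (· != c)).length : Nat) : Int) else -1 := by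
  rw [show PySem.Chars.find l [c] = PySem.Chars.find.go [c] l 0 from rfl,
    pvFindGo_singleton]
  simp

theorem pvSplitOnGo_singleton (c : Char) (l : List Char) :
    ∀ (fuel : Nat) (cur : List Char) (acc : List (List Char)), l.length ≤ fuel →
      PySem.Chars.splitOn.go [c] fuel l cur acc =
        acc.reverse ++ (pvSplitChar c l).modifyHead (cur.reverse ++ ·) := by
  induction l with
  | nil =>
    intro fuel cur acc _
    cases fuel <;> simp [PySem.Chars.splitOn.go, pvSplitChar]
  | cons h t ih =>
    intro fuel cur acc hf
    match fuel with
    | fuel + 1 =>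
      rw [PySem.Chars.splitOn.go]
      by_cases hc : h = c
      · subst hc
        have hpre : [h].isPrefixOf (h :: t) = true := by simp [List.isPrefixOf]
        rw [hpre]
        simp only [if_true, List.length_cons, List.length_nil, Nat.zero_add, List.drop_succ_cons,
          List.drop_zero]
        rw [ih fuel [] (cur.reverse :: acc) (by simp at hf; omega)]
        simp [pvSplitChar]
        cases pvSplitChar h t <;> simp
      · have hpre : [c].isPrefixOf (h :: t) = false := by
          simp [List.isPrefixOf]; exact fun e => absurd e.symm hc
        rw [hpre]
        simp only [Bool.false_eq_true, if_false]
        rw [ih fuel (h :: cur) acc (by simp at hf; omega)]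
        simp only [pvSplitChar, if_neg hc]
        cases pvSplitChar c t <;> simp

theorem pvSplitOn_singleton (c : Char) (l : List Char) :
    PySem.Chars.splitOn l [c] = pvSplitChar c l := by
  rw [PySem.Chars.splitOn, pvSplitOnGo_singleton c l (l.length + 1) [] [] (by omega)]
  simp
  cases pvSplitChar c l <;> simp

theorem pvReplaceGo_singleton (c : Char) (l : List Char) :
    ∀ (fuel : Nat) (acc : List Char), l.length ≤ fuel →
      PySem.Chars.replace.go [c] [] fuel l acc = acc.reverse ++ l.filter (· != c) := by
  induction l with
  | nil => intro fuel acc _; cases fuel <;> simp [PySem.Chars.replace.go]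
  | cons h t ih =>
    intro fuel acc hf
    match fuel with
    | fuel + 1 =>
      rw [PySem.Chars.replace.go]
      by_cases hc : h = c
      · subst hc
        have hpre : [h].isPrefixOf (h :: t) = true := by simp [List.isPrefixOf]
        rw [hpre]
        simp only [if_true, List.length_cons, List.length_nil, Nat.zero_add, List.drop_succ_cons,
          List.drop_zero, List.reverse_nil, List.nil_append]
        rw [ih fuel acc (by simp at hf; omega)]
        simp
      · have hpre : [c].isPrefixOf (h :: t) = false := by
          simp [List.isPrefixOf]; exact fun e => absurd e.symm hc
        rw [hpre]
        simp only [Bool.false_eq_true, if_false]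
        rw [ih fuel (h :: acc) (by simp at hf; omega)]
        simp [hc]

theorem pvReplace_singleton (c : Char) (l : List Char) :
    PySem.Chars.replace l [c] [] = l.filter (· != c) := by
  rw [PySem.Chars.replace]
  simp only [List.isEmpty_cons, Bool.false_eq_true, if_false]
  rw [pvReplaceGo_singleton c l l.length [] le_rfl]
  simp

-- ---- strip facts ----

theorem pvStrip_eq_nil_iff (l : List Char) :
    PySem.Chars.strip l = [] ↔ ∀ x ∈ l, PySem.Chars.isspace x := by
  simp only [PySem.Chars.strip, PySem.Chars.rstrip, PySem.Chars.lstrip,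
    List.reverse_eq_nil_iff, List.dropWhile_eq_nil_iff, List.mem_reverse]
  constructor
  · intro h x hx
    by_cases hws : PySem.Chars.isspace x
    · exact hws
    · exfalso
      have hx' : x ∈ List.dropWhile PySem.Chars.isspace l := by
        have halt := List.takeWhile_append_dropWhile (p := PySem.Chars.isspace) (l := l)
        rcases List.mem_append.mp (halt ▸ hx) with h1 | h1
        · exact absurd (List.mem_takeWhile_imp h1) hws
        · exact h1
      exact hws (h x hx')
  · intro h x hx
    exact h x (List.dropWhile_subset _ hx)

theorem pvStrip_append_left_ws (b u : List Char) (hb : ∀ x ∈ b, PySem.Chars.isspace x) :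
    PySem.Chars.strip (b ++ u) = PySem.Chars.strip u := by
  have hb' : List.dropWhile PySem.Chars.isspace b = [] := List.dropWhile_eq_nil_iff.mpr hb
  simp [PySem.Chars.strip, PySem.Chars.lstrip, List.dropWhile_append, hb']

theorem pvStrip_append_star (y : List Char) :
    ∃ u, PySem.Chars.strip (y ++ ['*']) = u ++ ['*'] := by
  have hstar : PySem.Chars.isspace '*' = false := by decide
  have hl : ∃ u, PySem.Chars.lstrip (y ++ ['*']) = u ++ ['*'] := by
    simp only [PySem.Chars.lstrip, List.dropWhile_append]
    by_cases h : (List.dropWhile PySem.Chars.isspace y).isEmpty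
    · exact ⟨[], by simp [h, hstar]⟩
    · exact ⟨List.dropWhile PySem.Chars.isspace y, by simp [h]⟩
  obtain ⟨u, hu⟩ := hl
  refine ⟨u, ?_⟩
  rw [PySem.Chars.strip, hu, PySem.Chars.rstrip]
  simp [hstar]

theorem pvClean_append_star_ne_nil (y : List Char) : pvClean (y ++ ['*']) ≠ [] := by
  obtain ⟨u, hu⟩ := pvStrip_append_star y
  simp [pvClean, hu, pvReplace_singleton, List.filter_append]

-- ---- bridging port A to the reference ----

theorem pvStrIsspace_singleton (c : Char) :
    PySem.Chars.strIsspace [c] = PySem.Chars.isspace c := by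
  simp [PySem.Chars.strIsspace]

theorem pvSkipWs_drop (cs : List Char) (pos : Nat) :
    cs.drop (pvSkipWs cs pos) = (cs.drop pos).dropWhile PySem.Chars.isspace := by
  unfold pvSkipWs
  split
  · rename_i h
    rw [List.drop_eq_getElem_cons h]
    split
    · rename_i hws
      rw [pvStrIsspace_singleton] at hws
      rw [List.dropWhile_cons_of_pos hws]
      exact pvSkipWs_drop cs (pos + 1)
    · rename_i hws
      rw [pvStrIsspace_singleton] at hws
      rw [List.dropWhile_cons_of_neg (by simpa using hws)]
      exact (List.drop_eq_getElem_cons h).symm ▸ rfl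
  · rename_i h
    rw [List.drop_eq_nil_of_le (by omega : cs.length ≤ pos)]
    simp
termination_by cs.length - pos

theorem pvSkipWs_stop (cs : List Char) (pos : Nat) :
    ∀ (h : pvSkipWs cs pos < cs.length), PySem.Chars.isspace (cs[pvSkipWs cs pos]'h) = false := by
  unfold pvSkipWs
  split
  · split
    · exact pvSkipWs_stop cs (pos + 1)
    · rename_i h hws
      intro h'
      rw [pvStrIsspace_singleton] at hws
      simpa using hws
  · rename_i h
    intro h'
    omega
termination_by cs.length - pos

theorem pvTake_takeWhile (p : Char → Bool) (l : List Char) :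
    l.take (l.takeWhile p).length = l.takeWhile p := by
  nth_rewrite 2 [← List.takeWhile_append_dropWhile (p := p) (l := l)]
  exact List.take_left

theorem pvDrop_takeWhile (p : Char → Bool) (l : List Char) :
    l.drop (l.takeWhile p).length = l.dropWhile p := by
  nth_rewrite 2 [← List.takeWhile_append_dropWhile (p := p) (l := l)]
  exact List.drop_left

theorem pvFoldl_emit (parts : List (List Char)) : ∀ (init : List (String × String)),
    parts.foldl (fun acc part =>
      if (PySem.Chars.strip part).isEmpty = true then acc
      else acc ++ [("param", String.ofList (PySem.Chars.strip part ++ ['*']))]) init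
      = init ++ parts.flatMap pvEmit := by
  induction parts with
  | nil => intro init; simp
  | cons q qs ih =>
    intro init
    simp only [List.foldl_cons]
    by_cases hq : (PySem.Chars.strip q).isEmpty = true
    · rw [if_pos hq, ih, List.flatMap_cons, show pvEmit q = [] by simp [pvEmit, hq]]
      simp
    · rw [if_neg hq, ih, List.flatMap_cons,
        show pvEmit q = [("param", String.ofList (PySem.Chars.strip q ++ ['*']))] by
          simp [pvEmit]; intro h; exact absurd (by simp [h]) hq]
      simp

theorem pvTokA_eq_core (cs : List Char) :
    ∀ (n pos : Nat), cs.length ≤ pos + n →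
      pvTokA cs pos = pvTokCore ((cs.drop pos).dropWhile PySem.Chars.isspace) := by
  intro n
  induction n with
  | zero =>
    intro pos hn
    rw [pvTokA, dif_neg (by omega : ¬ pos < cs.length),
      List.drop_eq_nil_of_le (by omega : cs.length ≤ pos)]
    simp [pvTokCore]
  | succ n ih =>
    intro pos hn
    by_cases hpos : pos < cs.length
    · rw [pvTokA, dif_pos hpos]
      have hge : pos ≤ pvSkipWs cs pos := pvSkipWs_ge cs pos
      have hdrop : cs.drop (pvSkipWs cs pos) = (cs.drop pos).dropWhile PySem.Chars.isspace :=
        pvSkipWs_drop cs pos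
      set p := pvSkipWs cs pos with hp
      by_cases h2 : p < cs.length
      · rw [dif_pos h2]
        have hcons : cs.drop p = cs[p] :: cs.drop (p + 1) := List.drop_eq_getElem_cons h2
        have hrhs : (cs.drop pos).dropWhile PySem.Chars.isspace = cs[p] :: cs.drop (p + 1) := by
          rw [← hdrop, hcons]
        rw [hrhs]
        have hcws : ¬ PySem.Chars.isspace cs[p] = true := by
          have h5 := pvSkipWs_stop cs pos (hp ▸ h2)
          simp only [← hp] at h5
          simp [h5]
        by_cases hc : cs[p] = '%'
        · rw [if_pos hc]
          simp only []
          rw [PySem.Chars.findFrom_natCast cs ['%'] (p + 1) h2, pvFind_singleton]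
          rw [pvTokCore, if_pos hc]
          by_cases hm : '%' ∈ cs.drop (p + 1)
          · rw [if_pos hm]
            set j := ((cs.drop (p + 1)).takeWhile (· != '%')).length with hj
            rw [if_neg (by omega : ¬ ((j : Nat) : Int) = -1),
              if_neg (by omega : ¬ (((p + 1 : Nat) : Int) + ((j : Nat) : Int)) = -1)]
            have htn : (((p + 1 : Nat) : Int) + ((j : Nat) : Int)).toNat = p + 1 + j := by omega
            rw [htn, PySem.List.slice_natCast]
            have hsub : (p + 1 + j) - (p + 1) = j := by omega
            rw [hsub, hj, pvTake_takeWhile, pvSplitOn_singleton, pvFoldl_emit,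
              ih (p + 1 + j + 1) (by omega)]
            have hdrop2 : cs.drop (p + 1 + j + 1)
                = ((cs.drop (p + 1)).dropWhile (· != '%')).tail := by
              rw [← pvDrop_takeWhile (· != '%') (cs.drop (p + 1)), ← hj, List.tail_drop,
                List.drop_drop]
              congr 1 <;> omega
            rw [hdrop2, if_pos hm]
            simp [pvPTokens]
          · rw [if_neg hm, if_pos rfl, if_pos rfl, PySem.List.slice_natCast]
            have htake : (cs.drop (p + 1)).take (cs.length - (p + 1)) = cs.drop (p + 1) := by
              apply List.take_of_length_le
              simp
            rw [htake, pvSplitOn_singleton, pvFoldl_emit, ih (cs.length + 1) (by omega),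
              List.drop_eq_nil_of_le (by omega : cs.length ≤ cs.length + 1)]
            have htw : (cs.drop (p + 1)).takeWhile (· != '%') = cs.drop (p + 1) :=
              List.takeWhile_eq_self_iff.mpr (fun x hx => by
                simp; exact fun e => hm (e ▸ hx))
            rw [if_neg hm, htw]
            simp [pvPTokens, pvTokCore]
        · rw [if_neg hc]
          simp only []
          rw [PySem.Chars.findFrom_natCast cs ['*'] p (le_of_lt h2), pvFind_singleton,
            hcons, pvTokCore, if_neg hc]
          by_cases hm : '*' ∈ cs[p] :: cs.drop (p + 1)
          · rw [if_pos hm, if_pos hm]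
            set l1 := cs[p] :: cs.drop (p + 1) with hl1
            set j := (l1.takeWhile (· != '*')).length with hj
            rw [if_neg (by omega : ¬ ((j : Nat) : Int) = -1),
              if_neg (by omega : ¬ (((p : Nat) : Int) + ((j : Nat) : Int)) = -1)]
            have hnil : l1.dropWhile (· != '*') ≠ [] := by
              rw [Ne, List.dropWhile_eq_nil_iff]
              intro h
              have := h '*' hm
              simp at this
            have hhead : (l1.dropWhile (· != '*')).head hnil = '*' := by
              have := List.head_dropWhile_not (· != '*') hnil
              simpa using this
            have hdw : l1.dropWhile (· != '*') = '*' :: (l1.dropWhile (· != '*')).tail := by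
              conv_lhs => rw [← List.cons_head_tail hnil, hhead]
            have hcast : ((p : Nat) : Int) + ((j : Nat) : Int) + 1 = ((p + j + 1 : Nat) : Int) := by
              push_cast; ring
            rw [hcast, PySem.List.slice_natCast]
            have hsub : (p + j + 1) - p = j + 1 := by omega
            rw [hsub, hcons]
            have htake : l1.take (j + 1) = l1.takeWhile (· != '*') ++ ['*'] := by
              rw [List.take_add, hj, pvTake_takeWhile, pvDrop_takeWhile]
              rw [hdw]
              rfl
            rw [htake]
            have htn : (((p : Nat) : Int) + ((j : Nat) : Int)).toNat = p + j := by omega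
            rw [htn, ih (p + j + 1) (by omega)]
            have hdrop2 : cs.drop (p + j + 1) = (l1.dropWhile (· != '*')).tail := by
              rw [← pvDrop_takeWhile (· != '*') l1, ← hj, List.tail_drop, ← hcons,
                List.drop_drop]
              congr 1 <;> omega
            rw [hdrop2]
            have hne := pvClean_append_star_ne_nil (l1.takeWhile (· != '*'))
            simp only [pvClean] at hne
            rw [if_neg (fun h => hne (List.isEmpty_iff.mp h))]
            simp [pvClean, pvStmtTok]
          · rw [if_neg hm, if_pos rfl, if_neg hm, PySem.List.slice_from_natCast, hcons]
            have hne : PySem.Chars.strip (cs[p] :: cs.drop (p + 1)) ≠ [] := by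
              rw [Ne, pvStrip_eq_nil_iff]
              intro h
              exact hcws (h cs[p] List.mem_cons_self)
            rw [if_neg (fun h => hne (List.isEmpty_iff.mp h))]
            simp [pvStmtTok]
      · rw [dif_neg h2, ← hdrop, List.drop_eq_nil_of_le (by omega : cs.length ≤ p)]
        simp [pvTokCore]
    · rw [pvTokA, dif_neg hpos, List.drop_eq_nil_of_le (by omega : cs.length ≤ pos)]
      simp [pvTokCore]

-- ---- bridging port B to the reference ----

theorem pvSplitChar_not_mem (c : Char) (l : List Char) (h : c ∉ l) :
    pvSplitChar c l = [l] := by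
  induction l with
  | nil => rfl
  | cons x t ih =>
    have hx : ¬ x = c := fun e => h (by simp [e])
    simp [pvSplitChar, hx, ih (fun hm => h (by simp [hm]))]

theorem pvSplitChar_append (c : Char) (a u : List Char) (h : c ∉ a) :
    pvSplitChar c (a ++ c :: u) = a :: pvSplitChar c u := by
  induction a with
  | nil => simp [pvSplitChar]
  | cons x a ih =>
    have hx : ¬ x = c := fun e => h (by simp [e])
    simp [pvSplitChar, hx, ih (fun hm => h (by simp [hm]))]

theorem pvPTokens_not_mem (b : List Char) (h : '*' ∉ b) :
    pvPTokens b = pvEmit b := by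
  simp [pvPTokens, pvSplitChar_not_mem '*' b h]

theorem pvPTokens_append (b u : List Char) (h : '*' ∉ b) :
    pvPTokens (b ++ '*' :: u) = pvEmit b ++ pvPTokens u := by
  simp [pvPTokens, pvSplitChar_append '*' b u h]

theorem pvScanB_param (t : List Char) :
    ∀ (b : List Char), '*' ∉ b →
      pvScanB true b t =
        pvPTokens (b ++ t.takeWhile (· != '%')) ++
          (if '%' ∈ t then pvScanB false [] ((t.dropWhile (· != '%')).tail) else []) := by
  induction t with
  | nil =>
    intro b hb
    simp [pvScanB, pvPTokens_not_mem b hb, pvEmit]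
  | cons c t ih =>
    intro b hb
    by_cases hc : c = '%'
    · subst hc
      have hcond : ('%' : Char) = '%' ∨ ('%' : Char) = '*' := Or.inl rfl
      simp only [pvScanB, if_pos hcond, if_pos rfl, List.takeWhile_cons]
      norm_num
      rw [pvPTokens_not_mem b hb]
      simp [pvEmit, List.dropWhile_cons_of_neg]
    · by_cases hs : c = '*'
      · subst hs
        have hcond : ('*' : Char) = '%' ∨ ('*' : Char) = '*' := Or.inr rfl
        have e1 : ¬ (('*' : Char) = '%') := by decide
        have e2 : ¬ (('%' : Char) = '*') := by decide
        simp only [pvScanB, if_pos hcond, if_neg e1]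
        rw [ih [] (by simp)]
        simp only [List.takeWhile_cons, List.dropWhile_cons, List.mem_cons, List.nil_append]
        have e3 : (('*' : Char) != '%') = true := by decide
        simp only [e3, if_true, e2, false_or]
        rw [pvPTokens_append b _ hb]
        simp [pvEmit]
      · have hcond : ¬ (c = '%' ∨ c = '*') := by tauto
        simp only [pvScanB, if_neg hcond]
        rw [ih (b ++ [c]) (by simp [Ne.symm, hs]; exact fun h => hb h)]
        have hb1 : (c != '%') = true := by simp [hc]
        have hc' : ¬ (('%' : Char) = c) := fun e => hc e.symm
        simp only [List.takeWhile_cons, List.dropWhile_cons, hb1, if_true, List.mem_cons,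
          List.append_assoc, List.cons_append, List.nil_append, hc', false_or]

theorem pvScanB_stmt (t : List Char) :
    ∀ (b : List Char), (∃ x ∈ b, ¬ PySem.Chars.isspace x) →
      pvScanB false b t =
        if '*' ∈ t then
          pvStmtTok (pvClean (b ++ t.takeWhile (· != '*') ++ ['*'])) ++
            pvScanB false [] ((t.dropWhile (· != '*')).tail)
        else pvStmtTok (PySem.Chars.strip (b ++ t)) := by
  induction t with
  | nil =>
    intro b hex
    have hne : PySem.Chars.strip b ≠ [] := by
      rw [Ne, pvStrip_eq_nil_iff]
      obtain ⟨x, hx, hxs⟩ := hex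
      exact fun h => hxs (h x hx)
    have hmem : ¬ ('*' : Char) ∈ ([] : List Char) := by simp
    simp [pvScanB, pvStmtTok, hne, if_neg hmem]
  | cons c t ih =>
    intro b hex
    by_cases hs : c = '*'
    · subst hs
      simp only [pvScanB, if_pos rfl, List.takeWhile_cons]
      have e3 : ¬ ((('*' : Char) != '*') = true) := by decide
      simp only [if_neg e3, List.dropWhile_cons_of_neg e3, List.mem_cons, true_or, if_pos,
        List.tail_cons, List.append_nil]
      rfl
    · have hne : PySem.Chars.strip b ≠ [] := by
        rw [Ne, pvStrip_eq_nil_iff]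
        obtain ⟨x, hx, hxs⟩ := hex
        exact fun h => hxs (h x hx)
      have hcond : ¬ (c = '%' ∧ (PySem.Chars.strip b).isEmpty = true) := by
        rintro ⟨-, h2⟩
        exact hne (List.isEmpty_iff.mp h2)
      simp only [pvScanB, if_neg hs, if_neg hcond]
      obtain ⟨x, hx, hxs⟩ := hex
      rw [ih (b ++ [c]) ⟨x, List.mem_append_left _ hx, hxs⟩]
      have hb1 : (c != '*') = true := by simp [hs]
      have hs' : ¬ (('*' : Char) = c) := fun e => hs e.symm
      simp only [List.takeWhile_cons, List.dropWhile_cons, hb1, if_true, List.mem_cons,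
        List.append_assoc, List.cons_append, List.nil_append, hs', false_or,
        Bool.false_eq_true, if_false]

theorem pvScanB_eq_core :
    ∀ (n : Nat) (l b : List Char), l.length ≤ n → (∀ x ∈ b, PySem.Chars.isspace x) →
      pvScanB false b l = pvTokCore (l.dropWhile PySem.Chars.isspace) := by
  intro n
  induction n with
  | zero =>
    intro l b hl hb
    have : l = [] := List.eq_nil_of_length_eq_zero (by omega)
    subst this
    have hs0 : PySem.Chars.strip b = [] := (pvStrip_eq_nil_iff b).mpr hb
    simp [pvScanB, pvTokCore, hs0]
  | succ n ih =>
    intro l b hl hb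
    match l with
    | [] =>
      have hs0 : PySem.Chars.strip b = [] := (pvStrip_eq_nil_iff b).mpr hb
      simp [pvScanB, pvTokCore, hs0]
    | c :: t =>
      by_cases hws : PySem.Chars.isspace c
      · have hs : ¬ c = '*' := fun e => by rw [e] at hws; exact absurd hws (by decide)
        have hc : ¬ c = '%' := fun e => by rw [e] at hws; exact absurd hws (by decide)
        have hcond : ¬ (c = '%' ∧ (PySem.Chars.strip b).isEmpty = true) := fun h => hc h.1
        simp only [pvScanB, Bool.false_eq_true, if_false, if_neg hs, if_neg hcond]
        rw [ih t (b ++ [c]) (by simp at hl; omega)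
          (by intro x hx; rcases List.mem_append.mp hx with h | h
              · exact hb x h
              · simp at h; subst h; exact hws),
          List.dropWhile_cons_of_pos hws]
      · by_cases hc : c = '%'
        · subst hc
          have hs0 : (PySem.Chars.strip b).isEmpty = true := by
            simp [List.isEmpty_iff, (pvStrip_eq_nil_iff b).mpr hb]
          have hs : ¬ (('%' : Char) = '*') := by decide
          simp only [pvScanB, Bool.false_eq_true, if_false, if_neg hs]
          simp only [true_and]
          rw [if_pos hs0]
          rw [pvScanB_param t [] (by simp), List.dropWhile_cons_of_neg (by simpa using hws)]
          rw [pvTokCore]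
          simp only [if_pos rfl, List.nil_append, if_true]
          by_cases hm : '%' ∈ t
          · simp only [if_pos hm]
            rw [ih ((t.dropWhile (· != '%')).tail) [] (by
                have h1 := List.length_dropWhile_le (· != '%') t
                simp only [List.length_tail] at *
                simp at hl
                omega) (by simp)]
          · simp [hm]
        · by_cases hs : c = '*'
          · subst hs
            have e3 : ¬ ((('*' : Char) != '*') = true) := by decide
            simp only [pvScanB, Bool.false_eq_true, if_false, if_pos rfl]
            rw [ih t [] (by simp at hl; omega) (by simp)]
            rw [List.dropWhile_cons_of_neg (by simpa using hws), pvTokCore]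
            have hne : ¬ (('*' : Char) = '%') := by decide
            simp only [if_neg hne, List.mem_cons, true_or, if_pos, List.takeWhile_cons,
              if_neg e3, List.dropWhile_cons_of_neg e3, List.tail_cons, List.nil_append]
            have hstr : PySem.Chars.strip (b ++ ['*']) = PySem.Chars.strip ['*'] :=
              pvStrip_append_left_ws b ['*'] hb
            have hstar : PySem.Chars.strip ['*'] = ['*'] := by decide
            simp [pvClean, hstr, hstar, pvStmtTok]
          · have hcond : ¬ (c = '%' ∧ (PySem.Chars.strip b).isEmpty = true) := fun h => hc h.1
            simp only [pvScanB, Bool.false_eq_true, if_false, if_neg hs, if_neg hcond]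
            rw [pvScanB_stmt t (b ++ [c]) ⟨c, by simp, hws⟩]
            rw [List.dropWhile_cons_of_neg (by simpa using hws), pvTokCore]
            have hb1 : (c != '*') = true := by simp [hs]
            have hs' : ¬ (('*' : Char) = c) := fun e => hs e.symm
            simp only [if_neg hc, List.mem_cons, hs', false_or, List.takeWhile_cons,
              List.dropWhile_cons, hb1, if_true]
            by_cases hm : '*' ∈ t
            · simp only [if_pos hm]
              rw [ih ((t.dropWhile (· != '*')).tail) [] (by
                  have h1 := List.length_dropWhile_le (· != '*') t
                  simp only [List.length_tail] at *
                  simp at hl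
                  omega) (by simp)]
              have hstr : PySem.Chars.strip (b ++ c :: (t.takeWhile (· != '*') ++ ['*']))
                  = PySem.Chars.strip (c :: (t.takeWhile (· != '*') ++ ['*'])) :=
                pvStrip_append_left_ws b _ hb
              simp [pvClean, hstr]
            · simp only [if_neg hm]
              have hstr : PySem.Chars.strip (b ++ c :: t) = PySem.Chars.strip (c :: t) :=
                pvStrip_append_left_ws b _ hb
              simp [hstr]

-- ===== VERDICT (by name: the statement is the Claim_ definition above) =====
theorem tokenize_gerber_spec : Claim_equal_tokenize_gerber := by
  intro text _
  unfold Spec_tokenize_gerber tokenize_gerber tokenize_gerber_alt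
  rw [pvTokA_eq_core text.toList text.toList.length 0 (by omega),
      pvScanB_eq_core text.toList.length text.toList [] le_rfl (by simp)]
  simp
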